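-- pv_equiv track=rewrite | github.com/Zeyafb/watch-or-skip | data/ncaa_client.py | _split_teams
-- ===== SOURCE A (Python) =====
-- def _split_teams(competitors: list) -> tuple[dict, dict]:
--     """Split competitors into GMU and opponent."""
--     gmu = None
--     opp = None
--     for c in competitors:
--         if "george mason" in c["team"]["displayName"].lower():
--             gmu = c
--         else:
--             opp = c
--     return gmu or {}, opp or {}
-- ===== SOURCE B (Python) =====
-- def _split_teams(competitors: list) -> tuple[dict, dict]:
--     """Split competitors into GMU and opponent."""
--     gmu = {}
--     opp = {}
--     for c in reversed(competitors):
--         if gmu and opp: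
--             break
--         if "george mason" in c["team"]["displayName"].lower():
--             if not gmu:
--                 gmu = c
--         else:
--             if not opp:
--                 opp = c
--     return gmu, opp
-- ===== Notes on version B (the rewrite author's own statement) =====
-- stated objective: alternative
-- what changed: Scans the list backwards with first-match-wins semantics and an early break once both slots are filled, instead of A's forward pass that keeps overwriting two accumulators (last-wins); the backward first match equals the forward last match.
import Mathlib
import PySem

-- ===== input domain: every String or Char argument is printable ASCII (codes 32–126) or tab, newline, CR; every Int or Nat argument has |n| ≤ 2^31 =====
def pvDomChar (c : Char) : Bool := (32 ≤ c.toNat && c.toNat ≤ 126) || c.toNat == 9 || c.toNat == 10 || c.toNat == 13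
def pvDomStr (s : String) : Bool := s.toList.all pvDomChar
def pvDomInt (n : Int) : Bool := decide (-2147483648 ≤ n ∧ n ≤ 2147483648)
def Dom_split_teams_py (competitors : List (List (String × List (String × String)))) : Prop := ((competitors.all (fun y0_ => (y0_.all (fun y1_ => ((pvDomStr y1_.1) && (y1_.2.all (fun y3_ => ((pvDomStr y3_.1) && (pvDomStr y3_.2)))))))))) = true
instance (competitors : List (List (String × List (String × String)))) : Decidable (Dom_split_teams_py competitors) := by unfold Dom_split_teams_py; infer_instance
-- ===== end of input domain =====

-- ===== PORT A =====
-- B scans backwards with first-match-wins and an early break; A scans forwards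
-- overwriting two accumulators (last-wins). Return value only, no mutation.

-- c["team"]["displayName"]: first-match association-list lookup (dict convention);
-- `none` is exactly where Python raises KeyError — those inputs are excluded by Pre_.
def pvName (c : List (String × List (String × String))) : Option String :=
  (c.find? (fun p => p.1 == "team")).bind
    (fun t => (t.2.find? (fun q => q.1 == "displayName")).map (fun q => q.2))

-- "george mason" in c["team"]["displayName"].lower(); the `.getD ""` branch is only
-- reached outside Pre_ (where Python raises), so the port is exact on Pre_.
def pvIsGmu (c : List (String × List (String × String))) : Bool :=
  PySem.Str.isIn "george mason" (PySem.Str.lower ((pvName c).getD ""))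

-- A's loop: gmu/opp start as None and are overwritten; `x or {}` is `.getD []`
-- (inside Pre_ a stored competitor contains the key "team", hence is a truthy dict).
def split_teams_py (competitors : List (List (String × List (String × String)))) : (List (String × List (String × String))) × (List (String × List (String × String))) :=
  let st := competitors.foldl
    (fun (st : Option (List (String × List (String × String))) × Option (List (String × List (String × String)))) c =>
      if pvIsGmu c then (some c, st.2) else (st.1, some c))
    (none, none)
  (st.1.getD [], st.2.getD [])

-- ===== PORT B =====
-- B's loop over reversed(competitors): `{}`/`not gmu` is the empty dict [], the break
-- test `gmu and opp` is both accumulators nonempty.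
def pvAltLoop (l : List (List (String × List (String × String))))
    (gmu opp : List (String × List (String × String))) :
    (List (String × List (String × String))) × (List (String × List (String × String))) :=
  match l with
  | [] => (gmu, opp)
  | c :: rest =>
    if gmu ≠ [] ∧ opp ≠ [] then (gmu, opp)
    else if pvIsGmu c then pvAltLoop rest (if gmu = [] then c else gmu) opp
    else pvAltLoop rest gmu (if opp = [] then c else opp)

def split_teams_py_alt (competitors : List (List (String × List (String × String)))) : (List (String × List (String × String))) × (List (String × List (String × String))) :=
  pvAltLoop competitors.reverse [] []

-- ===== PRECONDITION & SPEC =====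
-- Pre_ excludes exactly the inputs where A raises KeyError: a competitor without a
-- "team" key or whose team dict lacks "displayName".
def Pre_split_teams_py (competitors : List (List (String × List (String × String)))) : Prop :=
  ∀ c ∈ competitors, (pvName c).isSome = true
instance (competitors : List (List (String × List (String × String)))) : Decidable (Pre_split_teams_py competitors) := by unfold Pre_split_teams_py; infer_instance
def pvWitness_split_teams_py : (List (List (String × List (String × String)))) :=
  [[("team", [("displayName", "George Mason Patriots")])],
   [("team", [("displayName", "Duke Blue Devils")])]]
def Spec_split_teams_py (competitors : List (List (String × List (String × String)))) (out : (List (String × List (String × String))) × (List (String × List (String × String)))) : Prop := out = split_teams_py_alt competitors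
instance (competitors : List (List (String × List (String × String)))) (out : (List (String × List (String × String))) × (List (String × List (String × String)))) : Decidable (Spec_split_teams_py competitors out) := by unfold Spec_split_teams_py; infer_instance

-- ===== CLAIM (what is proved, stated in full; the proofs are below) =====
def Claim_equal_split_teams_py : Prop := ∀ (competitors : List (List (String × List (String × String)))), Dom_split_teams_py competitors → Pre_split_teams_py competitors → Spec_split_teams_py competitors (split_teams_py competitors)

-- ===== LEMMAS AND PROOFS =====
-- A's fold invariant: each component is the LAST element of the corresponding filtered
-- list seen so far (or the incoming accumulator).
theorem pv_last_or {A : Type} (a : A) (xs : List A) (g : Option A) :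
    ((a :: xs).getLast?).or g = (xs.getLast?).or (some a) := by
  cases hl : xs.getLast? <;> simp [List.getLast?_cons, hl]

theorem pv_fold_eq (l : List (List (String × List (String × String))))
    (g o : Option (List (String × List (String × String)))) :
    l.foldl
      (fun (st : Option (List (String × List (String × String))) × Option (List (String × List (String × String)))) c =>
        if pvIsGmu c then (some c, st.2) else (st.1, some c)) (g, o)
    = (((l.filter (fun c => pvIsGmu c)).getLast?).or g,
       ((l.filter (fun c => !pvIsGmu c)).getLast?).or o) := by
  induction l generalizing g o with
  | nil => simp
  | cons c l ih =>
    by_cases h : pvIsGmu c = true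
    · simp only [List.foldl_cons, h, List.filter_cons, Bool.not_true,
        Bool.false_eq_true, if_true, if_false, ih]
      rw [pv_last_or]
    · simp only [List.foldl_cons, h, List.filter_cons, if_false, Bool.not_false, if_true,
        Bool.false_eq_true, ih]
      rw [pv_last_or]

-- B's loop invariant: first match in l fills an empty slot; provided the list carries
-- no empty dict (Pre_ guarantees it), an early break never changes the result.
theorem pv_altLoop_eq (l : List (List (String × List (String × String))))
    (gmu opp : List (String × List (String × String)))
    (hne : ∀ c ∈ l, c ≠ []) :
    pvAltLoop l gmu opp
    = ((if gmu = [] then ((l.filter (fun c => pvIsGmu c)).head?).getD [] else gmu),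
       (if opp = [] then ((l.filter (fun c => !pvIsGmu c)).head?).getD [] else opp)) := by
  induction l generalizing gmu opp with
  | nil => simp [pvAltLoop]
  | cons c l ih =>
    have hc : c ≠ [] := hne c (by simp)
    have hne' : ∀ x ∈ l, x ≠ [] := fun x hx => hne x (by simp [hx])
    by_cases hbrk : gmu ≠ [] ∧ opp ≠ []
    · simp [pvAltLoop, hbrk]
    · by_cases h : pvIsGmu c = true
      · simp only [pvAltLoop, hbrk, if_false, h, if_true, ih _ _ hne',
          List.filter_cons, Bool.not_true, Bool.false_eq_true]
        by_cases hg : gmu = [] <;> simp [hg, hc]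
      · simp only [pvAltLoop, hbrk, if_false, h, ih _ _ hne',
          List.filter_cons, Bool.not_false, Bool.false_eq_true, if_true]
        by_cases ho : opp = [] <;> simp [ho, hc]

-- ===== VERDICT (by name: the statement is the Claim_ definition above) =====
theorem split_teams_py_spec : Claim_equal_split_teams_py := by
  intro competitors _ hpre
  unfold Spec_split_teams_py split_teams_py split_teams_py_alt
  have hne : ∀ c ∈ competitors.reverse, c ≠ [] := by
    intro c hc hnil
    have := hpre c (List.mem_reverse.mp hc)
    simp [hnil, pvName] at this
  rw [pv_fold_eq, pv_altLoop_eq _ _ _ hne]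
  simp [List.filter_reverse, List.head?_reverse]
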